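-- pv_equiv track=rewrite | github.com/2dos/DK64-Randomizer | randomizer/CompileHints.py | ApplyColorToPlandoHint
-- ===== SOURCE A (Python) =====
-- def ApplyColorToPlandoHint(hint):
--     """Replace plandomizer color tags with the appropriate characters."""
--     new_hint = hint
--     color_replace_dict = {
--         "[orange]": "\x04",
--         "[/orange]": "\x04",
--         "[red]": "\x05",
--         "[/red]": "\x05",
--         "[blue]": "\x06",
--         "[/blue]": "\x06",
--         "[purple]": "\x07",
--         "[/purple]": "\x07",
--         "[lightgreen]": "\x08",
--         "[/lightgreen]": "\x08",
--         "[magenta]": "\x09",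
--         "[/magenta]": "\x09",
--         "[cyan]": "\x0a",
--         "[/cyan]": "\x0a",
--         "[rust]": "\x0b",
--         "[/rust]": "\x0b",
--         "[paleblue]": "\x0c",
--         "[/paleblue]": "\x0c",
--         "[green]": "\x0d",
--         "[/green]": "\x0d",
--     }
--     for color_tag, color_character in color_replace_dict.items():
--         new_hint = new_hint.replace(color_tag, color_character)
--     return new_hint
-- ===== SOURCE B (Python) =====
-- def ApplyColorToPlandoHint(hint):
--     """Replace plandomizer color tags with the appropriate characters."""
--     color_replace_dict = {
--         "[orange]": "\x04",
--         "[/orange]": "\x04",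
--         "[red]": "\x05",
--         "[/red]": "\x05",
--         "[blue]": "\x06",
--         "[/blue]": "\x06",
--         "[purple]": "\x07",
--         "[/purple]": "\x07",
--         "[lightgreen]": "\x08",
--         "[/lightgreen]": "\x08",
--         "[magenta]": "\x09",
--         "[/magenta]": "\x09",
--         "[cyan]": "\x0a",
--         "[/cyan]": "\x0a",
--         "[rust]": "\x0b",
--         "[/rust]": "\x0b",
--         "[paleblue]": "\x0c",
--         "[/paleblue]": "\x0c",
--         "[green]": "\x0d",
--         "[/green]": "\x0d",
--     }
--     out = []
--     i = 0
--     n = len(hint)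
--     while i < n:
--         for tag, ch in color_replace_dict.items():
--             if hint.startswith(tag, i):
--                 out.append(ch)
--                 i += len(tag)
--                 break
--         else:
--             out.append(hint[i])
--             i += 1
--     return "".join(out)
-- ===== Notes on version B (the rewrite author's own statement) =====
-- stated objective: alternative
-- what changed: A rewrites the whole string 20 times, once per tag, via str.replace; B makes a single left-to-right scan that at each position dispatches through the same tag table, emitting the control character and skipping the tag on a match.
import Mathlib
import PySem

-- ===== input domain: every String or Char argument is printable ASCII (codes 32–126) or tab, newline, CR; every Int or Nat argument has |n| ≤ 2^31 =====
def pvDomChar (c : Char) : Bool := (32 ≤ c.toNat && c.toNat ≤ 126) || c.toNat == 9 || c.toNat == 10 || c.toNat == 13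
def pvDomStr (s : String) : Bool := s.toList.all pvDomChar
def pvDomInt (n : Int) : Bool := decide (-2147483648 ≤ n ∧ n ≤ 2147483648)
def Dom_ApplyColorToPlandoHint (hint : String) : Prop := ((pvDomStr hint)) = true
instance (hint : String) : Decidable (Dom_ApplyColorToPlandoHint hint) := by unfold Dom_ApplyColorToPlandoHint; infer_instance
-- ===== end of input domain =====

-- B replaces A's 20 sequential full-string str.replace passes with one left-to-right scan that
-- dispatches each position through the same tag table (objective: alternative; return values identical).

-- ===== PORT A =====
def ApplyColorToPlandoHint (hint : String) : String :=
  let colorReplaceDict : List (String × String) :=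
    [("[orange]", "\x04"), ("[/orange]", "\x04"),
     ("[red]", "\x05"), ("[/red]", "\x05"),
     ("[blue]", "\x06"), ("[/blue]", "\x06"),
     ("[purple]", "\x07"), ("[/purple]", "\x07"),
     ("[lightgreen]", "\x08"), ("[/lightgreen]", "\x08"),
     ("[magenta]", "\x09"), ("[/magenta]", "\x09"),
     ("[cyan]", "\x0a"), ("[/cyan]", "\x0a"),
     ("[rust]", "\x0b"), ("[/rust]", "\x0b"),
     ("[paleblue]", "\x0c"), ("[/paleblue]", "\x0c"),
     ("[green]", "\x0d"), ("[/green]", "\x0d")]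
  colorReplaceDict.foldl (fun newHint p => PySem.Str.replace newHint p.1 p.2) hint

-- ===== PORT B =====
def pvColorPairs : List (List Char × List Char) :=
  [("[orange]".toList, "\x04".toList), ("[/orange]".toList, "\x04".toList),
   ("[red]".toList, "\x05".toList), ("[/red]".toList, "\x05".toList),
   ("[blue]".toList, "\x06".toList), ("[/blue]".toList, "\x06".toList),
   ("[purple]".toList, "\x07".toList), ("[/purple]".toList, "\x07".toList),
   ("[lightgreen]".toList, "\x08".toList), ("[/lightgreen]".toList, "\x08".toList),
   ("[magenta]".toList, "\x09".toList), ("[/magenta]".toList, "\x09".toList),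
   ("[cyan]".toList, "\x0a".toList), ("[/cyan]".toList, "\x0a".toList),
   ("[rust]".toList, "\x0b".toList), ("[/rust]".toList, "\x0b".toList),
   ("[paleblue]".toList, "\x0c".toList), ("[/paleblue]".toList, "\x0c".toList),
   ("[green]".toList, "\x0d".toList), ("[/green]".toList, "\x0d".toList)]

-- the single scan: at each position try the tags in table order (the `!p.1.isEmpty` conjunct is
-- only a termination guard; every tag in the table is nonempty, so it never changes the result)
def pvScanColor (pairs : List (List Char × List Char)) (s : List Char) : List Char :=
  match s with
  | [] => []
  | a :: s' =>
    match h : pairs.find? (fun p => p.1.isPrefixOf (a :: s') && !p.1.isEmpty) with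
    | some p => p.2 ++ pvScanColor pairs ((a :: s').drop p.1.length)
    | none => a :: pvScanColor pairs s'
termination_by s.length
decreasing_by
  · have hp := List.find?_some h
    have h1 : p.1 ≠ [] := by
      intro he; rw [he] at hp; simp at hp
    have : 1 ≤ p.1.length := by
      cases hc : p.1 with
      | nil => exact absurd hc h1
      | cons b bs => simp
    simp only [List.length_drop, List.length_cons]
    omega
  · simp

def ApplyColorToPlandoHint_alt (hint : String) : String :=
  String.ofList (pvScanColor pvColorPairs hint.toList)

-- ===== PRECONDITION & SPEC =====
def Spec_ApplyColorToPlandoHint (hint : String) (out : String) : Prop := out = ApplyColorToPlandoHint_alt hint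
instance (hint : String) (out : String) : Decidable (Spec_ApplyColorToPlandoHint hint out) := by unfold Spec_ApplyColorToPlandoHint; infer_instance

-- ===== CLAIM (what is proved, stated in full; the proofs are below) =====
def Claim_equal_ApplyColorToPlandoHint : Prop := ∀ (hint : String), Dom_ApplyColorToPlandoHint hint → Spec_ApplyColorToPlandoHint hint (ApplyColorToPlandoHint hint)

-- ===== LEMMAS AND PROOFS =====

theorem pvAndSplit {a b : Bool} (h : (a && b) = true) : a = true ∧ b = true := by
  simpa using h

-- structural form of one CPython str.replace pass (left-to-right, non-overlapping)
def pvRep1 (t r : List Char) (s : List Char) : List Char :=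
  match s with
  | [] => []
  | a :: s' =>
    if h : t ≠ [] ∧ t.isPrefixOf (a :: s') then r ++ pvRep1 t r ((a :: s').drop t.length)
    else a :: pvRep1 t r s'
termination_by s.length
decreasing_by
  · have : 1 ≤ t.length := by
      cases hc : t with
      | nil => exact absurd hc h.1
      | cons b bs => simp
    simp only [List.length_drop, List.length_cons]
    omega
  · simp

-- A's fold of replace passes, on the char-list side
def pvFoldA (L : List (List Char × List Char)) (s : List Char) : List Char :=
  L.foldl (fun acc p => pvRep1 p.1 p.2 acc) s

-- shape conditions the 20 pairs satisfy
def pvTagOK (t : List Char) : Bool :=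
  t.head? == some '[' && t.tail.all (fun x => x ≠ '[' && 32 ≤ x.toNat)
def pvRepOK (r : List Char) : Bool := r.length == 1 && r.all (fun c => c.toNat < 32)
def pvPairsOK (L : List (List Char × List Char)) : Bool :=
  L.all (fun p => pvTagOK p.1 && pvRepOK p.2)

theorem pvTagOK_head {t : List Char} (h : pvTagOK t = true) : t.head? = some '[' := by
  rcases pvAndSplit h with ⟨h1, -⟩
  simpa using h1

theorem pvTagOK_ne {t : List Char} (h : pvTagOK t = true) : t ≠ [] := by
  intro he; rw [he] at h; simp [pvTagOK] at h

theorem pvTagOK_tail {t : List Char} (h : pvTagOK t = true) : ∀ x ∈ t.tail, x ≠ '[' := by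
  rcases pvAndSplit h with ⟨-, h2⟩
  intro x hx
  have := List.all_eq_true.mp h2 x hx
  rcases pvAndSplit this with ⟨h3, -⟩
  simpa using h3

theorem pvTagOK_ge {t : List Char} (h : pvTagOK t = true) : ∀ x ∈ t, 32 ≤ x.toNat := by
  rcases pvAndSplit h with ⟨h1, h2⟩
  intro x hx
  cases t with
  | nil => simp at hx
  | cons b bs =>
    have hb : b = '[' := by simpa using h1
    rcases List.mem_cons.mp hx with rfl | hx'
    · rw [hb]; decide
    · have := List.all_eq_true.mp h2 x hx'
      rcases pvAndSplit this with ⟨-, h4⟩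
      simpa using h4

theorem pvRepOK_ne {r : List Char} (h : pvRepOK r = true) : r ≠ [] := by
  intro he; rw [he] at h; simp [pvRepOK] at h

theorem pvRepOK_lt {r : List Char} (h : pvRepOK r = true) : ∀ c ∈ r, c.toNat < 32 := by
  rcases pvAndSplit h with ⟨-, h2⟩
  intro c hc
  simpa using List.all_eq_true.mp h2 c hc


theorem pvPairsOK_cons {p : List Char × List Char} {ps : List (List Char × List Char)}
    (h : pvPairsOK (p :: ps) = true) :
    (pvTagOK p.1 && pvRepOK p.2) = true ∧ pvPairsOK ps = true := by
  rw [pvPairsOK, List.all_cons] at h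
  exact ⟨(pvAndSplit h).1, (pvAndSplit h).2⟩

theorem pvPairsOK_append {L₁ L₂ : List (List Char × List Char)}
    (h : pvPairsOK (L₁ ++ L₂) = true) : pvPairsOK L₁ = true ∧ pvPairsOK L₂ = true := by
  rw [pvPairsOK, List.all_append] at h
  exact ⟨(pvAndSplit h).1, (pvAndSplit h).2⟩

theorem pvPairsOK_mem {L : List (List Char × List Char)} {p : List Char × List Char}
    (h : pvPairsOK L = true) (hm : p ∈ L) : pvTagOK p.1 = true ∧ pvRepOK p.2 = true :=
  pvAndSplit (List.all_eq_true.mp h p hm)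

-- PySem.Chars.replace (old nonempty) IS pvRep1
theorem pvGo_eq (t r : List Char) (ht : t ≠ []) :
    ∀ (fuel : Nat) (l acc : List Char), l.length ≤ fuel →
      PySem.Chars.replace.go t r fuel l acc = acc.reverse ++ pvRep1 t r l := by
  intro fuel
  induction fuel with
  | zero =>
    intro l acc hl
    have : l = [] := List.length_eq_zero_iff.mp (Nat.le_zero.mp hl)
    subst this
    simp [PySem.Chars.replace.go, pvRep1]
  | succ n ih =>
    intro l acc hl
    cases l with
    | nil => simp [PySem.Chars.replace.go, pvRep1]
    | cons c cs =>
      rw [PySem.Chars.replace.go]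
      by_cases hp : t.isPrefixOf (c :: cs) = true
      · rw [if_pos hp, pvRep1, dif_pos ⟨ht, hp⟩]
        have h1 : 1 ≤ t.length := by
          cases hc : t with
          | nil => exact absurd hc ht
          | cons b bs => simp
        rw [ih _ _ (by simp only [List.length_drop, List.length_cons] at hl ⊢; omega)]
        simp
      · rw [if_neg hp, pvRep1, dif_neg (by tauto)]
        rw [ih _ _ (by simpa using hl)]
        simp

theorem pvReplace_eq (s t r : List Char) (ht : t ≠ []) :
    PySem.Chars.replace s t r = pvRep1 t r s := by
  unfold PySem.Chars.replace
  rw [if_neg (by simpa using ht)]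
  simpa using pvGo_eq t r ht s.length s [] (le_refl _)

-- A's String-level fold is pvFoldA on toList
theorem pvFoldA_toList (Ls : List (String × String)) (s : String)
    (h : ∀ p ∈ Ls, p.1 ≠ "") :
    (Ls.foldl (fun nh p => PySem.Str.replace nh p.1 p.2) s).toList
      = pvFoldA (Ls.map (fun p => (p.1.toList, p.2.toList))) s.toList := by
  induction Ls generalizing s with
  | nil => simp [pvFoldA]
  | cons p ps ih =>
    have hp : p.1.toList ≠ [] := by
      intro he
      exact h p (List.mem_cons_self) (String.toList_eq_nil_iff.mp he)
    simp only [List.foldl_cons, List.map_cons, pvFoldA]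
    rw [ih _ (fun q hq => h q (List.mem_cons_of_mem _ hq))]
    simp only [pvFoldA, PySem.Str.replace, String.toList_ofList]
    rw [pvReplace_eq _ _ _ hp]

-- a tag-shaped (printable) prefix of a replace pass's output was already a prefix of its input
theorem pvBackPrefix (t r : List Char) (hr : ∀ c ∈ r, c.toNat < 32) (hrne : r ≠ []) :
    ∀ (z u : List Char), (∀ x ∈ u, 32 ≤ x.toNat) → u <+: pvRep1 t r z → u <+: z := by
  intro z
  induction z using pvRep1.induct t with
  | case1 => intro u _ h; rw [pvRep1] at h; simpa using h
  | case2 a s' hcond _ =>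
    intro u hu h
    rw [pvRep1, dif_pos hcond] at h
    cases u with
    | nil => exact List.nil_prefix
    | cons x u' =>
      cases r with
      | nil => exact absurd rfl hrne
      | cons c r' =>
        rcases List.cons_prefix_cons.mp h with ⟨rfl, -⟩
        have h1 := hu x List.mem_cons_self
        have h2 := hr x List.mem_cons_self
        omega
  | case3 a s' hcond ih =>
    intro u hu h
    rw [pvRep1, dif_neg hcond] at h
    cases u with
    | nil => exact List.nil_prefix
    | cons x u' =>
      rcases List.cons_prefix_cons.mp h with ⟨rfl, h'⟩
      exact List.cons_prefix_cons.mpr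
        ⟨rfl, ih u' (fun y hy => hu y (List.mem_cons_of_mem _ hy)) h'⟩

-- one replace pass walks over a segment whose interior has no '['
theorem pvSkipSeg (t r : List Char) (ht : t.head? = some '[') :
    ∀ (w z : List Char), (∀ x ∈ w.tail, x ≠ '[') → (w ≠ [] → ¬ t <+: (w ++ z)) →
      pvRep1 t r (w ++ z) = w ++ pvRep1 t r z := by
  intro w
  induction w with
  | nil => intro z _ _; simp
  | cons a w' ih =>
    intro z hw h0
    have hnp : ¬ t <+: (a :: (w' ++ z)) := by
      simpa using h0 (by simp)
    rw [List.cons_append, pvRep1, dif_neg (by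
      rintro ⟨-, hpre⟩
      exact hnp (List.isPrefixOf_iff_prefix.mp hpre))]
    congr 1
    apply ih z (fun x hx => hw x (List.mem_of_mem_tail (by simpa using hx)))
    intro hne hpre
    cases w' with
    | nil => exact absurd rfl hne
    | cons b w'' =>
      cases t with
      | nil => simp at ht
      | cons tc t' =>
        have htc : tc = '[' := by simpa using ht
        rcases List.cons_prefix_cons.mp hpre with ⟨hbc, -⟩
        exact hw b (by simp) (by rw [← hbc, htc])

-- a replace pass on the suffix cannot create a new tag occurrence across the boundary
theorem pvLift (u w t r z : List Char) (hu : pvTagOK u = true) (hr : pvRepOK r = true)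
    (hp : ¬ u <+: w ++ z) : ¬ u <+: w ++ pvRep1 t r z := by
  intro h
  by_cases hl : u.length ≤ w.length
  · exact hp (((List.isPrefix_append_of_length hl).mp h).trans (List.prefix_append w z))
  · have hwu : w <+: u :=
      List.prefix_of_prefix_length_le (List.prefix_append w _) h (by omega)
    rcases hwu with ⟨u', rfl⟩
    have h1 : u' <+: pvRep1 t r z := (List.prefix_append_right_inj w).mp h
    have h2 : ∀ x ∈ u', 32 ≤ x.toNat := fun x hx =>
      pvTagOK_ge hu x (by simp [hx])
    have h3 : u' <+: z :=
      pvBackPrefix t r (pvRepOK_lt hr) (pvRepOK_ne hr) z u' h2 h1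
    exact hp ((List.prefix_append_right_inj w).mpr h3)

-- the whole fold of replace passes walks over such a segment
theorem pvFoldSkip (L : List (List Char × List Char)) :
    ∀ (z w : List Char), pvPairsOK L = true → (∀ x ∈ w.tail, x ≠ '[') →
      (∀ p ∈ L, ¬ p.1 <+: w ++ z) →
      pvFoldA L (w ++ z) = w ++ pvFoldA L z := by
  induction L with
  | nil => intro z w _ _ _; simp [pvFoldA]
  | cons p ps ih =>
    intro z w hL hw hp
    obtain ⟨hpok, hps⟩ := pvPairsOK_cons hL
    obtain ⟨htag, hrep⟩ := pvAndSplit hpok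
    simp only [pvFoldA, List.foldl_cons]
    rw [pvSkipSeg p.1 p.2 (pvTagOK_head htag) w z hw
      (fun _ => hp p List.mem_cons_self)]
    exact ih (pvRep1 p.1 p.2 z) w hps hw
      (fun q hq => pvLift q.1 w p.1 p.2 z
        (pvPairsOK_mem hps hq).1
        hrep (hp q (List.mem_cons_of_mem _ hq)))

theorem pvScanColor_some {pairs : List (List Char × List Char)} {a : Char}
    {s' : List Char} {p : List Char × List Char}
    (h : pairs.find? (fun p => p.1.isPrefixOf (a :: s') && !p.1.isEmpty) = some p) :
    pvScanColor pairs (a :: s') = p.2 ++ pvScanColor pairs ((a :: s').drop p.1.length) := by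
  rw [pvScanColor]
  split
  next p' heq => rw [h] at heq; cases heq; rfl
  next heq => rw [h] at heq; cases heq

theorem pvScanColor_none {pairs : List (List Char × List Char)} {a : Char} {s' : List Char}
    (h : pairs.find? (fun p => p.1.isPrefixOf (a :: s') && !p.1.isEmpty) = none) :
    pvScanColor pairs (a :: s') = a :: pvScanColor pairs s' := by
  rw [pvScanColor]
  split
  next p' heq => rw [h] at heq; cases heq
  next heq => rfl

theorem pvFoldA_nil (L : List (List Char × List Char)) : pvFoldA L [] = [] := by
  induction L with
  | nil => rfl
  | cons p ps ih => simpa [pvFoldA, List.foldl_cons, pvRep1] using ih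

theorem pvMatchStep (t r X : List Char) (ht : t ≠ []) :
    pvRep1 t r (t ++ X) = r ++ pvRep1 t r X := by
  cases t with
  | nil => exact absurd rfl ht
  | cons c t' =>
    rw [List.cons_append, pvRep1, dif_pos ⟨ht, by
      rw [List.isPrefixOf_iff_prefix, ← List.cons_append]
      exact List.prefix_append _ _⟩]
    rw [← List.cons_append, List.drop_left]

-- MAIN: the fold of replace passes equals the single scan
theorem pvMain (L : List (List Char × List Char)) (hL : pvPairsOK L = true) :
    ∀ (n : Nat) (s : List Char), s.length ≤ n → pvFoldA L s = pvScanColor L s := by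
  intro n
  induction n with
  | zero =>
    intro s hs
    have : s = [] := List.length_eq_zero_iff.mp (Nat.le_zero.mp hs)
    subst this
    rw [pvFoldA_nil, pvScanColor]
  | succ n ih =>
    intro s hs
    cases s with
    | nil => rw [pvFoldA_nil, pvScanColor]
    | cons a s' =>
      cases hfind : L.find? (fun p => p.1.isPrefixOf (a :: s') && !p.1.isEmpty) with
      | none =>
        have hnot : ∀ p ∈ L, ¬ p.1 <+: (a :: s') := by
          intro p hpm hpre
          have hne : p.1 ≠ [] := pvTagOK_ne (pvPairsOK_mem hL hpm).1
          have := List.find?_eq_none.mp hfind p hpm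
          simp only [Bool.and_eq_true, Bool.not_eq_true', List.isEmpty_eq_false_iff] at this
          exact this ⟨List.isPrefixOf_iff_prefix.mpr hpre, hne⟩
        have hstep : pvFoldA L (a :: s') = a :: pvFoldA L s' := by
          have := pvFoldSkip L s' [a] hL (by simp) (by simpa using hnot)
          simpa using this
        rw [hstep, pvScanColor_none hfind, ih s' (by simpa using hs)]
      | some p =>
        rcases List.find?_eq_some_iff_append.mp hfind with ⟨hpred, L₁, L₂, rfl, hbefore⟩
        obtain ⟨hpre, hne'⟩ := pvAndSplit hpred
        have htne : p.1 ≠ [] := by simpa using hne'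
        have h1 : 1 ≤ p.1.length := by
          cases hc : p.1 with
          | nil => exact absurd hc htne
          | cons b bs => simp
        rcases List.isPrefixOf_iff_prefix.mp hpre with ⟨z, hz⟩
        -- split pairsOK
        obtain ⟨hL₁', hrest⟩ := pvPairsOK_append hL
        obtain ⟨hpok, hL₂'⟩ := pvPairsOK_cons hrest
        obtain ⟨htag, hrep⟩ := pvAndSplit hpok
        -- the replacement is one control character
        obtain ⟨hlen, -⟩ := pvAndSplit hrep
        have : ∃ c, p.2 = [c] := by
          cases hc : p.2 with
          | nil => rw [hc] at hlen; simp at hlen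
          | cons c cs =>
            rw [hc] at hlen
            cases cs with
            | nil => exact ⟨c, rfl⟩
            | cons d ds => simp at hlen
        rcases this with ⟨c, hc⟩
        have hclt : c.toNat < 32 := pvRepOK_lt hrep c (by simp [hc])
        -- fold decomposition
        have hsplit : ∀ X, pvFoldA (L₁ ++ p :: L₂) X
            = pvFoldA L₂ (pvRep1 p.1 p.2 (pvFoldA L₁ X)) := by
          intro X; simp [pvFoldA, List.foldl_append]
        have hnotL₁ : ∀ q ∈ L₁, ¬ q.1 <+: p.1 ++ z := by
          intro q hq hpre'
          have hqtag : pvTagOK q.1 = true := (pvPairsOK_mem hL₁' hq).1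
          have hb := hbefore q hq
          rw [hz] at hpre'
          have h4 : q.1.isPrefixOf (a :: s') = true := List.isPrefixOf_iff_prefix.mpr hpre'
          have h5 : q.1.isEmpty = false := by
            cases hqc : q.1 with
            | nil => exact absurd hqc (pvTagOK_ne hqtag)
            | cons _ _ => simp
          rw [h4, h5] at hb
          simp at hb
        have step1 : pvFoldA L₁ (p.1 ++ z) = p.1 ++ pvFoldA L₁ z := by
          apply pvFoldSkip L₁ z p.1 hL₁' (fun x hx => pvTagOK_tail htag x hx)
          intro q hq
          exact hnotL₁ q hq
        have step3 : pvFoldA L₂ ([c] ++ pvRep1 p.1 p.2 (pvFoldA L₁ z))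
            = [c] ++ pvFoldA L₂ (pvRep1 p.1 p.2 (pvFoldA L₁ z)) := by
          apply pvFoldSkip L₂ _ [c] hL₂' (by simp)
          intro q hq hpre'
          have hqtag : pvTagOK q.1 = true := (pvPairsOK_mem hL₂' hq).1
          have hqh := pvTagOK_head hqtag
          cases hqc : q.1 with
          | nil => rw [hqc] at hqh; simp at hqh
          | cons b bs =>
            rw [hqc] at hqh hpre'
            have hb : b = '[' := by simpa using hqh
            rcases List.cons_prefix_cons.mp hpre' with ⟨hbc, -⟩
            rw [hb] at hbc
            have hcn : c.toNat = 91 := by rw [← hbc]; decide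
            omega
        have hzlen : z.length ≤ n := by
          have : p.1.length + z.length = s'.length + 1 := by
            rw [← List.length_append, hz]; simp
          simp only [List.length_cons] at hs this
          omega
        calc pvFoldA (L₁ ++ p :: L₂) (a :: s')
            = pvFoldA L₂ (pvRep1 p.1 p.2 (pvFoldA L₁ (p.1 ++ z))) := by
              rw [hsplit, hz]
          _ = pvFoldA L₂ (pvRep1 p.1 p.2 (p.1 ++ pvFoldA L₁ z)) := by rw [step1]
          _ = pvFoldA L₂ (p.2 ++ pvRep1 p.1 p.2 (pvFoldA L₁ z)) := by
              rw [pvMatchStep _ _ _ htne]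
          _ = [c] ++ pvFoldA L₂ (pvRep1 p.1 p.2 (pvFoldA L₁ z)) := by rw [hc] at step3 ⊢; exact step3
          _ = [c] ++ pvFoldA (L₁ ++ p :: L₂) z := by rw [hsplit]
          _ = pvScanColor (L₁ ++ p :: L₂) (a :: s') := by
              rw [pvScanColor_some hfind, hc, ← hz, List.drop_left, ih z hzlen]

-- ===== VERDICT (by name: the statement is the Claim_ definition above) =====
theorem ApplyColorToPlandoHint_spec : Claim_equal_ApplyColorToPlandoHint := by
  intro hint _
  unfold Spec_ApplyColorToPlandoHint ApplyColorToPlandoHint ApplyColorToPlandoHint_alt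
  apply String.toList_inj.mp
  rw [pvFoldA_toList _ _ (by decide), String.toList_ofList]
  have hmap : ([("[orange]", "\x04"), ("[/orange]", "\x04"),
     ("[red]", "\x05"), ("[/red]", "\x05"),
     ("[blue]", "\x06"), ("[/blue]", "\x06"),
     ("[purple]", "\x07"), ("[/purple]", "\x07"),
     ("[lightgreen]", "\x08"), ("[/lightgreen]", "\x08"),
     ("[magenta]", "\x09"), ("[/magenta]", "\x09"),
     ("[cyan]", "\x0a"), ("[/cyan]", "\x0a"),
     ("[rust]", "\x0b"), ("[/rust]", "\x0b"),
     ("[paleblue]", "\x0c"), ("[/paleblue]", "\x0c"),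
     ("[green]", "\x0d"), ("[/green]", "\x0d")] : List (String × String)).map
       (fun p => (p.1.toList, p.2.toList)) = pvColorPairs := by decide
  rw [hmap]
  exact pvMain pvColorPairs (by decide) hint.toList.length hint.toList (le_refl _)
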